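-- pv_equiv track=rewrite | github.com/PabloAmedo/alpha_generator | auxiliar_scripts/general_tools.py | posicion_segundo_maximo
-- ===== SOURCE A (Python) =====
-- def posicion_segundo_maximo(arr):
--     # Verificar si hay al menos dos elementos únicos
--     if len(arr) < 2:
--         return None  # No hay segundo máximo
--
--     # Inicializar el máximo y segundo máximo
--     maximo = segundo_maximo = float('-inf')
--     pos_maximo = pos_segundo_maximo = -1
--
--     # Encontrar el máximo
--     for i, num in enumerate(arr):
--         if num > maximo:
--             maximo = num
--             pos_maximo = i
--
--     # Encontrar el segundo máximo
--     for i, num in enumerate(arr):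
--         if num > segundo_maximo and num < maximo:
--             segundo_maximo = num
--             pos_segundo_maximo = i
--
--     if segundo_maximo == float('-inf'):
--         return None  # No hay segundo máximo (por ejemplo, si todos los elementos son iguales)
--
--     return pos_segundo_maximo
-- ===== SOURCE B (Python) =====
-- def posicion_segundo_maximo(arr):
--     # single pass tracking (value, first index) of max and second-distinct-max
--     if len(arr) < 2:
--         return None
--     maximo = None
--     segundo = None
--     for i, num in enumerate(arr):
--         if maximo is None or num > maximo[0]:
--             segundo = maximo
--             maximo = (num, i)
--         elif num < maximo[0] and (segundo is None or num > segundo[0]):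
--             segundo = (num, i)
--     return None if segundo is None else segundo[1]
-- ===== Notes on version B (the rewrite author's own statement) =====
-- stated objective: alternative
-- what changed: Replaces A's two full scans (one to find the maximum, a second rescan for the second maximum) by a single pass that maintains (value, first index) slots for both the maximum and the second-largest distinct value, shifting the max slot into the second slot when a new maximum appears.
import Mathlib
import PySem

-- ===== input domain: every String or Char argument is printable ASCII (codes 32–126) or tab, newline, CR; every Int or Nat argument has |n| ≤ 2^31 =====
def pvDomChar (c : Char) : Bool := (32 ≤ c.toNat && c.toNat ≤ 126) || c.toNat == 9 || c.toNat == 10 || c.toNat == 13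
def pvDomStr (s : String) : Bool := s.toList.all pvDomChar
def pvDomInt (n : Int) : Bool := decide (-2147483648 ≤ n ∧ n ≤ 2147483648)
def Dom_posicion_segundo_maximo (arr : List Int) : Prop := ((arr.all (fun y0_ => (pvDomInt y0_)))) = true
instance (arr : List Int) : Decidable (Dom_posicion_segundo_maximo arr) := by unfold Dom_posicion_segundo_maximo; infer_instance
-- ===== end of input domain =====

-- B replaces A's two full passes (find max, then rescan for the second max) by a single pass
-- maintaining (value, first index) of both the maximum and the second-largest distinct value.

-- ===== PORT A =====
-- float('-inf') is represented by `none`: `num > maximo` with maximo = -inf is always true,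
-- `num < maximo` with maximo = -inf is always false (exact for Int inputs).
def pvGtNegInf (m : Option Int) (n : Int) : Bool :=
  match m with
  | none => true
  | some v => decide (v < n)

def pvLtOpt (n : Int) (M : Option Int) : Bool :=
  match M with
  | none => false
  | some v => decide (n < v)

def pvAStep1 (s : Option Int × Int) (p : Int × Int) : Option Int × Int :=
  if pvGtNegInf s.1 p.2 then (some p.2, p.1) else s

def pvAStep2 (M : Option Int) (s : Option Int × Int) (p : Int × Int) : Option Int × Int :=
  if pvGtNegInf s.1 p.2 && pvLtOpt p.2 M then (some p.2, p.1) else s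

def posicion_segundo_maximo (arr : List Int) : Option Int :=
  if arr.length < 2 then none
  else
    let m := (PySem.List.enumerate arr).foldl pvAStep1 (none, -1)
    let s := (PySem.List.enumerate arr).foldl (pvAStep2 m.1) (none, -1)
    if s.1 = none then none else some s.2

-- ===== PORT B =====
-- state: (max slot, second slot), each an optional (value, index) pair
def pvBStep (st : Option (Int × Int) × Option (Int × Int)) (p : Int × Int) :
    Option (Int × Int) × Option (Int × Int) :=
  match st.1 with
  | none => (some (p.2, p.1), st.1)
  | some m =>
    if decide (m.1 < p.2) then (some (p.2, p.1), st.1)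
    else if decide (p.2 < m.1) &&
            (match st.2 with | none => true | some s => decide (s.1 < p.2)) then
      (st.1, some (p.2, p.1))
    else st

def posicion_segundo_maximo_alt (arr : List Int) : Option Int :=
  if arr.length < 2 then none
  else
    match ((PySem.List.enumerate arr).foldl pvBStep (none, none)).2 with
    | none => none
    | some s => some s.2

-- ===== PRECONDITION & SPEC =====
def Spec_posicion_segundo_maximo (arr : List Int) (out : Option Int) : Prop := out = posicion_segundo_maximo_alt arr
instance (arr : List Int) (out : Option Int) : Decidable (Spec_posicion_segundo_maximo arr out) := by unfold Spec_posicion_segundo_maximo; infer_instance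

-- ===== CLAIM (what is proved, stated in full; the proofs are below) =====
def Claim_equal_posicion_segundo_maximo : Prop := ∀ (arr : List Int), Dom_posicion_segundo_maximo arr → Spec_posicion_segundo_maximo arr (posicion_segundo_maximo arr)

-- ===== LEMMAS AND PROOFS =====

-- projection of B's optional (value, index) slot to A's (Option value, index) state
def pvConv (o : Option (Int × Int)) : Option Int × Int :=
  match o with
  | none => (none, -1)
  | some m => (some m.1, m.2)

lemma pvBStep_none (st : Option (Int × Int) × Option (Int × Int)) (p : Int × Int)
    (h : st.1 = none) : pvBStep st p = (some (p.2, p.1), st.1) := by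
  unfold pvBStep; rw [h]

lemma pvBStep_gt (st : Option (Int × Int) × Option (Int × Int)) (m p : Int × Int)
    (h : st.1 = some m) (hlt : m.1 < p.2) : pvBStep st p = (some (p.2, p.1), st.1) := by
  unfold pvBStep; rw [h]; simp [hlt]

lemma pvBStep_le (st : Option (Int × Int) × Option (Int × Int)) (m p : Int × Int)
    (h : st.1 = some m) (hle : ¬ m.1 < p.2) :
    pvBStep st p = if decide (p.2 < m.1) &&
        (match st.2 with | none => true | some s => decide (s.1 < p.2)) then
      (st.1, some (p.2, p.1)) else st := by
  unfold pvBStep; rw [h]; simp [hle]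

lemma pvBStep_le_fst (st : Option (Int × Int) × Option (Int × Int)) (m p : Int × Int)
    (h : st.1 = some m) (hle : ¬ m.1 < p.2) : (pvBStep st p).1 = st.1 := by
  rw [pvBStep_le st m p h hle]; split <;> split <;> rfl

lemma pvBStep_le_snd (st : Option (Int × Int) × Option (Int × Int)) (m p : Int × Int)
    (h : st.1 = some m) (hle : ¬ m.1 < p.2) :
    (pvBStep st p).2 = if decide (p.2 < m.1) &&
        (match st.2 with | none => true | some s => decide (s.1 < p.2)) then
      some (p.2, p.1) else st.2 := by
  rw [pvBStep_le st m p h hle]; split <;> split <;> rfl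

-- when every element is strictly below M, A's second pass IS A's first pass
lemma pvSec_all_lt (M : Int) (L : List (Int × Int)) (s : Option Int × Int)
    (h : ∀ p ∈ L, p.2 < M) :
    L.foldl (pvAStep2 (some M)) s = L.foldl pvAStep1 s := by
  induction L generalizing s with
  | nil => rfl
  | cons p L ih =>
    simp only [List.foldl_cons]
    rw [show pvAStep2 (some M) s p = pvAStep1 s p by
      simp [pvAStep2, pvAStep1, pvLtOpt, h p (by simp)]]
    exact ih _ (fun q hq => h q (by simp [hq]))

-- main invariant: B's single pass tracks A's first pass, A's second pass (with A's final
-- maximum), and the maximum bounds every element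
lemma pvMain (L : List (Int × Int)) :
    L.foldl pvAStep1 (none, -1) = pvConv (L.foldl pvBStep (none, none)).1 ∧
    L.foldl (pvAStep2 (L.foldl pvAStep1 (none, -1)).1) (none, -1)
      = pvConv (L.foldl pvBStep (none, none)).2 ∧
    ∀ q ∈ L, ∃ m, (L.foldl pvAStep1 (none, -1)).1 = some m ∧ q.2 ≤ m := by
  induction L using List.reverseRecOn with
  | nil => refine ⟨rfl, rfl, by simp⟩
  | append_singleton L p ih =>
    obtain ⟨h1, h2, h3⟩ := ih
    simp only [List.foldl_append, List.foldl_cons, List.foldl_nil]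
    by_cases hgt : pvGtNegInf (L.foldl pvAStep1 (none, -1)).1 p.2
    · -- new maximum
      have hA1 : pvAStep1 (L.foldl pvAStep1 (none, -1)) p = (some p.2, p.1) := by
        simp [pvAStep1, hgt]
      have hB1 : pvBStep (L.foldl pvBStep (none, none)) p
          = (some (p.2, p.1), (L.foldl pvBStep (none, none)).1) := by
        rcases hm : (L.foldl pvBStep (none, none)).1 with _ | m
        · rw [pvBStep_none _ p hm, hm]
        · have hm1 : (L.foldl pvAStep1 (none, -1)).1 = some m.1 := by
            rw [h1, hm]; rfl
          simp only [pvGtNegInf, hm1, decide_eq_true_eq] at hgt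
          rw [pvBStep_gt _ m p hm hgt, hm]
      have hlt : ∀ q ∈ L, q.2 < p.2 := by
        intro q hq
        obtain ⟨m, hm, hle⟩ := h3 q hq
        simp only [pvGtNegInf, hm, decide_eq_true_eq] at hgt
        omega
      refine ⟨?_, ?_, ?_⟩
      · rw [hA1, hB1]; rfl
      · rw [hA1, hB1]
        have hstep : pvAStep2 (some p.2)
            (L.foldl (pvAStep2 (some p.2)) (none, -1)) p
            = L.foldl (pvAStep2 (some p.2)) (none, -1) := by
          simp [pvAStep2, pvLtOpt]
        simp only [hstep]
        rw [pvSec_all_lt p.2 L _ hlt, h1]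
      · intro q hq
        refine ⟨p.2, by rw [hA1], ?_⟩
        rcases List.mem_append.1 hq with hq | hq
        · exact le_of_lt (hlt q hq)
        · simp at hq; subst hq; omega
    · -- not a new maximum: the old maximum is some m with p.2 ≤ m
      rcases hm : (L.foldl pvAStep1 (none, -1)).1 with _ | m
      · simp [pvGtNegInf, hm] at hgt
      have hple : ¬ (m < p.2) := by
        simpa [pvGtNegInf, hm] using hgt
      have hA1 : pvAStep1 (L.foldl pvAStep1 (none, -1)) p
          = L.foldl pvAStep1 (none, -1) := by
        simp [pvAStep1, hgt]
      have hBm : (L.foldl pvBStep (none, none)).1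
          = some (m, (L.foldl pvAStep1 (none, -1)).2) := by
        rcases hb : (L.foldl pvBStep (none, none)).1 with _ | b
        · rw [h1, hb] at hm; simp [pvConv] at hm
        · rw [h1, hb] at hm
          simp only [pvConv] at hm ⊢
          cases hm
          rw [h1, hb]; rfl
      refine ⟨?_, ?_, ?_⟩
      · rw [hA1, pvBStep_le_fst _ _ p hBm hple]
        exact h1
      · rw [hA1, hm]
        rw [hm] at h2
        rw [pvBStep_le_snd _ _ p hBm hple]
        rcases hs : (L.foldl pvBStep (none, none)).2 with _ | s
        · rw [hs] at h2
          by_cases hlt2 : p.2 < m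
          · simp [pvAStep2, pvGtNegInf, pvLtOpt, pvConv, h2, hlt2]
          · simp [pvAStep2, pvGtNegInf, pvLtOpt, pvConv, h2, hlt2]
        · rw [hs] at h2
          by_cases hlt2 : p.2 < m <;> by_cases hgs : s.1 < p.2
          · simp [pvAStep2, pvGtNegInf, pvLtOpt, pvConv, h2, hlt2, hgs]
          · simp [pvAStep2, pvGtNegInf, pvLtOpt, pvConv, h2, hlt2, hgs]
          · simp [pvAStep2, pvGtNegInf, pvLtOpt, pvConv, h2, hlt2]
          · simp [pvAStep2, pvGtNegInf, pvLtOpt, pvConv, h2, hlt2]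
      · intro q hq
        rw [hA1, hm]
        rcases List.mem_append.1 hq with hq | hq
        · obtain ⟨m', hm', hle⟩ := h3 q hq
          rw [hm] at hm'
          exact ⟨m, rfl, by cases hm'; exact hle⟩
        · simp at hq; subst hq; exact ⟨m, rfl, by omega⟩

-- ===== VERDICT (by name: the statement is the Claim_ definition above) =====
theorem posicion_segundo_maximo_spec : Claim_equal_posicion_segundo_maximo := by
  intro arr _
  unfold Spec_posicion_segundo_maximo posicion_segundo_maximo posicion_segundo_maximo_alt
  by_cases hlen : arr.length < 2
  · simp [hlen]
  · simp only [hlen, if_false]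
    obtain ⟨_, h2, _⟩ := pvMain (PySem.List.enumerate arr)
    rw [h2]
    rcases ((PySem.List.enumerate arr).foldl pvBStep (none, none)).2 with _ | s
    · simp [pvConv]
    · simp [pvConv]
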